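-- pv_equiv track=rewrite | github.com/UJHa/Codeit-Study | (09) 알고리즘 기초 - Brute Force/09) 1182 부분수열의 합/junhyoung_1182.py | sum_partical
-- ===== SOURCE A (Python) =====
-- import copy
--
-- def sum_partical(n, sequence):
--     if n == 1:
--         return sequence
--
--     # 부분수열의 합
--     sum_list = []
--     # n >= 2 인 상황
--     # i 는 sequence 의 원소중 하나 선택
--     for i in range(len(sequence)-n+1):
--         temp = copy.deepcopy(sequence)
--         cut = sum_partical(n-1, temp[i+1:])
--         for j in range(len(cut)):
--             cut[j] += temp[i]
--             sum_list.append(cut[j])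
--
--     return sum_list
-- ===== SOURCE B (Python) =====
-- from itertools import combinations
--
-- def sum_partical(n, sequence):
--     if n > len(sequence):
--         return []
--     return [sum(c) for c in combinations(sequence, n)]
-- ===== Notes on version B (the rewrite author's own statement) =====
-- stated objective: idiomatic
-- what changed: Replaces the hand-written recursion with deep copies and an in-place inner accumulation loop by a flat itertools.combinations enumeration (same index-lexicographic order) with one sum per combination.
import Mathlib
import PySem

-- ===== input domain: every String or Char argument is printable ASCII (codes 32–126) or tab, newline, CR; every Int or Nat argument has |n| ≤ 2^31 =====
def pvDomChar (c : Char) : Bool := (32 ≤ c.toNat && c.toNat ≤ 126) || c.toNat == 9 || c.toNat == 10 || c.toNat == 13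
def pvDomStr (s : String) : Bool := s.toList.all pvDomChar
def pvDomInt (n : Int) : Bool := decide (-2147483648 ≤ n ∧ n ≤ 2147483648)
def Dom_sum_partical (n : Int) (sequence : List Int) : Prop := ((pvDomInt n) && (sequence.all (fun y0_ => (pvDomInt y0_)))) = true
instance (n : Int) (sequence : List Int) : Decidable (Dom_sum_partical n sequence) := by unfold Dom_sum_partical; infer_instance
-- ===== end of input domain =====

-- B replaces A's recursion-with-deepcopy by a flat combinations enumeration summed once each (idiomatic; return-value equivalence on n ≥ 1).

-- ===== PORT A =====
def sum_partical (n : Int) (sequence : List Int) : List Int :=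
  if _h1 : n = 1 then sequence
  else if _h0 : n ≤ 0 then []  -- totality guard: for n ≤ 0 the Python recursion never terminates (RecursionError); outside Pre_
  else
    (PySem.List.pyRange 0 ((sequence.length : Int) - n + 1) 1).foldl
      (fun sum_list i =>
        let temp := sequence  -- copy.deepcopy(sequence): pure values, the copy is the value itself
        let cut := sum_partical (n - 1) (PySem.List.slice temp (some (i + 1)) none)
        -- for j in range(len(cut)): cut[j] += temp[i]; sum_list.append(cut[j])
        (PySem.List.pyRange 0 (cut.length : Int) 1).foldl
          (fun sl j => sl ++ [PySem.List.pyGetD cut j 0 + PySem.List.pyGetD temp i 0]) sum_list)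
      []
termination_by n.toNat
decreasing_by omega

-- ===== PORT B =====
-- itertools.combinations(xs, k) in its index-lexicographic order
def pvCombs (k : Nat) (xs : List Int) : List (List Int) :=
  match k, xs with
  | 0, _ => [[]]
  | _ + 1, [] => []
  | k + 1, x :: rest => (pvCombs k rest).map (fun c => x :: c) ++ pvCombs (k + 1) rest

def sum_partical_alt (n : Int) (sequence : List Int) : List Int :=
  if n < 0 then []  -- combinations raises ValueError for negative r; outside Pre_
  else if (sequence.length : Int) < n then []
  else (pvCombs n.toNat sequence).map List.sum

-- ===== PRECONDITION & SPEC =====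
-- Pre_ excludes exactly n ≤ 0: there the Python A recurses without bound and raises RecursionError.
def Pre_sum_partical (n : Int) (sequence : List Int) : Prop := 1 ≤ n
instance (n : Int) (sequence : List Int) : Decidable (Pre_sum_partical n sequence) := by unfold Pre_sum_partical; infer_instance
def pvWitness_sum_partical : Int × List Int := (2, [1, 2, 3])

def Spec_sum_partical (n : Int) (sequence : List Int) (out : List Int) : Prop := out = sum_partical_alt n sequence
instance (n : Int) (sequence : List Int) (out : List Int) : Decidable (Spec_sum_partical n sequence out) := by unfold Spec_sum_partical; infer_instance

-- ===== CLAIM (what is proved, stated in full; the proofs are below) =====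
def Claim_equal_sum_partical : Prop := ∀ (n : Int) (sequence : List Int), Dom_sum_partical n sequence → Pre_sum_partical n sequence → Spec_sum_partical n sequence (sum_partical n sequence)

-- ===== LEMMAS AND PROOFS =====

lemma combs_one_map_sum (xs : List Int) : (pvCombs 1 xs).map List.sum = xs := by
  induction xs with
  | nil => simp [pvCombs]
  | cons x rest ih => simp [pvCombs, ih]

lemma combs_nil_of_lt (k : Nat) (xs : List Int) (h : xs.length < k) : pvCombs k xs = [] := by
  induction xs generalizing k with
  | nil => cases k with
    | zero => omega
    | succ k => simp [pvCombs]
  | cons x rest ih =>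
    cases k with
    | zero => omega
    | succ k =>
      simp at h
      simp [pvCombs, ih k (by omega), ih (k+1) (by omega)]

lemma flat_combs (j : Nat) (xs : List Int) :
    (List.range (xs.length - j)).flatMap
      (fun t => ((pvCombs j (xs.drop (t + 1))).map List.sum).map (fun v => v + xs.getD t 0))
    = (pvCombs (j + 1) xs).map List.sum := by
  induction xs generalizing j with
  | nil => cases j <;> simp [pvCombs]
  | cons x rest ih =>
    by_cases h : rest.length < j
    · have h1 : (x :: rest).length - j = 0 := by simp; omega
      rw [h1, combs_nil_of_lt (j+1) (x :: rest) (by simp; omega)]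
      simp
    · have h1 : (x :: rest).length - j = (rest.length - j) + 1 := by simp; omega
      rw [h1, List.range_succ_eq_map, List.flatMap_cons, List.flatMap_map]
      simp only [List.drop_succ_cons, List.drop_zero, List.getD_cons_zero]
      simp only [List.getD_cons_succ]
      rw [ih j]
      show ((pvCombs j rest).map List.sum).map (fun v => v + x) ++ (pvCombs (j+1) rest).map List.sum
          = (pvCombs (j + 1) (x :: rest)).map List.sum
      simp only [pvCombs, List.map_append, List.map_map]
      congr 1
      apply List.map_congr_left
      intro c _
      simp [add_comm]

lemma inner_foldl (cut : List Int) (c : Int) (acc : List Int) :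
    (PySem.List.pyRange 0 (cut.length : Int) 1).foldl
      (fun sl j => sl ++ [PySem.List.pyGetD cut j 0 + c]) acc
    = acc ++ cut.map (fun v => v + c) := by
  rw [PySem.List.foldl_append_singleton_eq_map]
  congr 1
  have : (fun j => PySem.List.pyGetD cut j 0 + c)
      = (fun v => v + c) ∘ (fun j => PySem.List.pyGetD cut j (0:Int)) := rfl
  rw [this, ← List.map_map]
  rw [show ((cut.length : Int)) = PySem.List.len cut from by simp [PySem.List.len_eq]]
  rw [PySem.List.map_pyGetD_pyRange_zero]

lemma key (k : Nat) (seq : List Int) :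
    sum_partical ((k : Int) + 1) seq = (pvCombs (k + 1) seq).map List.sum := by
  induction k generalizing seq with
  | zero => rw [sum_partical]; simp [combs_one_map_sum]
  | succ k ih =>
    rw [sum_partical]
    rw [dif_neg (by omega), dif_neg (by omega)]
    show (PySem.List.pyRange 0 ((seq.length : Int) - (((k + 1 : Nat) : Int) + 1) + 1) 1).foldl
        (fun (sum_list : List Int) (i : Int) =>
          (PySem.List.pyRange 0
              ((sum_partical (((k + 1 : Nat) : Int) + 1 - 1) (PySem.List.slice seq (some (i + 1)) none)).length : Int) 1).foldl
            (fun sl j => sl ++ [PySem.List.pyGetD (sum_partical (((k + 1 : Nat) : Int) + 1 - 1) (PySem.List.slice seq (some (i + 1)) none)) j 0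
                + PySem.List.pyGetD seq i 0]) sum_list) []
      = (pvCombs (k + 1 + 1) seq).map List.sum
    rw [show (((k + 1 : Nat) : Int) + 1 - 1) = (k : Int) + 1 from by push_cast; ring]
    rw [show (fun (sum_list : List Int) (i : Int) =>
          (PySem.List.pyRange 0
              ((sum_partical ((k : Int) + 1) (PySem.List.slice seq (some (i + 1)) none)).length : Int) 1).foldl
            (fun sl j => sl ++ [PySem.List.pyGetD (sum_partical ((k : Int) + 1) (PySem.List.slice seq (some (i + 1)) none)) j 0
                + PySem.List.pyGetD seq i 0]) sum_list)
        = (fun (sum_list : List Int) (i : Int) => sum_list ++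
            (sum_partical ((k : Int) + 1) (PySem.List.slice seq (some (i + 1)) none)).map
              (fun v => v + PySem.List.pyGetD seq i 0)) from by
      funext sum_list i; exact inner_foldl _ _ _]
    rw [PySem.List.foldl_append_eq_flatMap, List.nil_append]
    rw [PySem.List.pyRange_one]
    rw [List.flatMap_map]
    have hcnt : ((seq.length : Int) - (((k + 1 : Nat) : Int) + 1) + 1 - 0).toNat = seq.length - (k + 1) := by
      push_cast; omega
    rw [hcnt]
    rw [show (fun (t : Nat) =>
          (sum_partical ((k : Int) + 1) (PySem.List.slice seq (some ((0 : Int) + (t : Int) + 1)) none)).map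
            (fun v => v + PySem.List.pyGetD seq ((0 : Int) + (t : Int)) 0))
        = (fun (t : Nat) => ((pvCombs (k + 1) (seq.drop (t + 1))).map List.sum).map
            (fun v => v + seq.getD t 0)) from by
      funext t
      rw [show (0 : Int) + (t : Int) = (t : Int) from by ring]
      rw [show (t : Int) + 1 = ((t + 1 : Nat) : Int) from by push_cast; ring]
      rw [PySem.List.slice_from_natCast, PySem.List.pyGetD_natCast, ih]]
    exact flat_combs (k + 1) seq

-- ===== VERDICT (by name: the statement is the Claim_ definition above) =====
theorem sum_partical_spec : Claim_equal_sum_partical := by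
  intro n seq _ hpre
  unfold Spec_sum_partical sum_partical_alt Pre_sum_partical at *
  rw [if_neg (by omega)]
  have hk : n = ((n - 1).toNat : Int) + 1 := by omega
  have hk2 : n.toNat = (n - 1).toNat + 1 := by omega
  by_cases hlen : (seq.length : Int) < n
  · rw [if_pos hlen, hk, key (n - 1).toNat seq, combs_nil_of_lt _ _ (by omega), List.map_nil]
  · rw [if_neg hlen, hk2, ← key (n - 1).toNat seq, ← hk]
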